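-- pv_equiv track=rewrite | github.com/dkoh12/gamma | google/minmax.py | num_elem_rule
-- ===== SOURCE A (Python) =====
-- def num_elem_rule(lst):
-- 	#indexlst = [(e, i) for i, e in enumerate(lst)]
-- 	#indexlst.sort()
-- 	#for e,i in indexlst:
--
-- 	A = set()
-- 	for i in range(len(lst)):
-- 		for j in range(len(lst)):
-- 			if i != j:
-- 				if not (abs(lst[i]-lst[j]) > abs(i-j)):
-- 					A.add(lst[i])
-- 					A.add(lst[j])
-- 	return len(A)
-- ===== SOURCE B (Python) =====
-- def num_elem_rule(lst):
--     # For i != j, |lst[i]-lst[j]| <= |i-j| iff the transformed points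
--     # (v+i, i-v) are comparable in the componentwise order.  Sort points by
--     # (v+i, i-v); a value participates iff its point is dominated by some
--     # later point (suffix sweep, running max) or dominates some earlier
--     # point (prefix sweep, running min).
--     pts = sorted(((v + i, i - v, v) for i, v in enumerate(lst)),
--                  key=lambda t: (t[0], t[1]))
--     marked = set()
--     hi = None
--     for u, nw, v in reversed(pts):
--         if hi is not None and hi >= nw:
--             marked.add(v)
--         if hi is None or nw > hi:
--             hi = nw
--     lo = None
--     for u, nw, v in pts:
--         if lo is not None and lo <= nw:
--             marked.add(v)
--         if lo is None or nw < lo: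
--             lo = nw
--     return len(marked)
-- ===== Notes on version B (the rewrite author's own statement) =====
-- stated objective: faster
-- what changed: A's quadratic all-pairs scan is replaced by the transform u=v+i, w=i-v (the pair condition |v_i-v_j|<=|i-j| becomes componentwise comparability of the points (u,w)), one sort of the points by (u,w), and two linear sweeps (suffix running max / prefix running min of w) that mark every value whose point is comparable to another point.
import Mathlib
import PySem

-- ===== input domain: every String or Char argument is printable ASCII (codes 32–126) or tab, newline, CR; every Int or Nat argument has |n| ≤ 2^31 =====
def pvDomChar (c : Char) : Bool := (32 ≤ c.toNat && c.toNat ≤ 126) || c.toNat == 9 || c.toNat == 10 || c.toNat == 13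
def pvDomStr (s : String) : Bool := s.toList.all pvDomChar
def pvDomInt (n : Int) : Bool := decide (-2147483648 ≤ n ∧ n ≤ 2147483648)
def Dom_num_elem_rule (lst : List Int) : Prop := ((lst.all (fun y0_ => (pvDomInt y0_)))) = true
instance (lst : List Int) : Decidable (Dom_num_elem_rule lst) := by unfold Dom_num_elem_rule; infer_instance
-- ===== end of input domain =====

-- B replaces A's quadratic all-pairs scan by a sort of the transformed points (v+i, i-v)
-- followed by two linear sweeps (suffix running max / prefix running min); faster.


-- ===== PORT A =====
def num_elem_rule (lst : List Int) : Int :=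
  let A : PySem.Set Int :=
    (PySem.List.pyRange 0 (PySem.List.len lst) 1).foldl (fun A i =>
      (PySem.List.pyRange 0 (PySem.List.len lst) 1).foldl (fun A j =>
        if i ≠ j then
          if ¬ (|PySem.List.pyGetD lst i 0 - PySem.List.pyGetD lst j 0| > |i - j|) then
            PySem.Set.add (PySem.Set.add A (PySem.List.pyGetD lst i 0)) (PySem.List.pyGetD lst j 0)
          else A
        else A) A) PySem.Set.empty
  PySem.Set.len A

-- ===== PORT B =====
-- one step of B's suffix sweep: mark if the running max `hi` reaches nw, then update `hi`
def pvStep1 (st : PySem.Set Int × Option Int) (t : Int × Int × Int) : PySem.Set Int × Option Int :=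
  let marked := match st.2 with
    | some hi => if hi ≥ t.2.1 then PySem.Set.add st.1 t.2.2 else st.1
    | none => st.1
  let hi' := match st.2 with
    | none => some t.2.1
    | some hi => if t.2.1 > hi then some t.2.1 else some hi
  (marked, hi')

-- one step of B's prefix sweep: mark if the running min `lo` is below nw, then update `lo`
def pvStep2 (st : PySem.Set Int × Option Int) (t : Int × Int × Int) : PySem.Set Int × Option Int :=
  let marked := match st.2 with
    | some lo => if lo ≤ t.2.1 then PySem.Set.add st.1 t.2.2 else st.1
    | none => st.1
  let lo' := match st.2 with
    | none => some t.2.1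
    | some lo => if t.2.1 < lo then some t.2.1 else some lo
  (marked, lo')

def num_elem_rule_alt (lst : List Int) : Int :=
  -- sorted(..., key=lambda t: (t[0], t[1])) is sorted2 on the first two components
  let pts := PySem.List.sorted2
    ((PySem.List.enumerate lst).map (fun p => (p.2 + p.1, p.1 - p.2, p.2)))
    (fun t => t.1) (fun t => t.2.1)
  let s1 := pts.reverse.foldl pvStep1 (PySem.Set.empty, none)
  let s2 := pts.foldl pvStep2 (s1.1, none)
  PySem.Set.len s2.1

-- ===== PRECONDITION & SPEC =====
def Spec_num_elem_rule (lst : List Int) (out : Int) : Prop := out = num_elem_rule_alt lst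
instance (lst : List Int) (out : Int) : Decidable (Spec_num_elem_rule lst out) := by unfold Spec_num_elem_rule; infer_instance

-- ===== CLAIM (what is proved, stated in full; the proofs are below) =====
def Claim_equal_num_elem_rule : Prop := ∀ (lst : List Int), Dom_num_elem_rule lst → Spec_num_elem_rule lst (num_elem_rule lst)

-- ===== LEMMAS AND PROOFS =====

-- value at a Nat index
def pvV (lst : List Int) (k : Nat) : Int := lst.getD k 0
-- the transformed point of index k
def pvTrip (lst : List Int) (k : Nat) : Int × Int × Int :=
  (pvV lst k + (k : Int), (k : Int) - pvV lst k, pvV lst k)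
-- strict lexicographic order on the first two components (the sort key)
def pvKlt (t t' : Int × Int × Int) : Prop := t.1 < t'.1 ∨ (t.1 = t'.1 ∧ t.2.1 < t'.2.1)
-- index k participates in some qualifying pair
def pvPart (lst : List Int) (k : Nat) : Prop :=
  ∃ j, j < lst.length ∧ j ≠ k ∧ |pvV lst k - pvV lst j| ≤ |(k : Int) - (j : Int)|

lemma pvV_getElem (lst : List Int) (k : Nat) (hk : k < lst.length) :
    pvV lst k = lst[k] := by
  unfold pvV
  rw [List.getD_eq_getElem lst 0 hk]

-- generic membership through a set-accumulating foldl
lemma pv_mem_foldl {α : Type} (step : PySem.Set Int → α → PySem.Set Int)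
    (P : α → Int → Prop)
    (h : ∀ S a x, x ∈ step S a ↔ x ∈ S ∨ P a x) :
    ∀ (l : List α) (S : PySem.Set Int) (x : Int),
      x ∈ l.foldl step S ↔ x ∈ S ∨ ∃ a ∈ l, P a x := by
  intro l
  induction l with
  | nil => simp
  | cons a l ih =>
    intro S x
    rw [List.foldl_cons, ih, h]
    constructor
    · rintro ((hx | hp) | ⟨b, hb, hP⟩)
      · exact Or.inl hx
      · exact Or.inr ⟨a, List.mem_cons_self, hp⟩
      · exact Or.inr ⟨b, List.mem_cons_of_mem _ hb, hP⟩
    · rintro (hx | ⟨b, hb, hP⟩)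
      · exact Or.inl (Or.inl hx)
      · rcases List.mem_cons.mp hb with rfl | hb
        · exact Or.inl (Or.inr hP)
        · exact Or.inr ⟨b, hb, hP⟩

lemma pv_nodup_foldl {α : Type} (step : PySem.Set Int → α → PySem.Set Int)
    (h : ∀ S a, S.Nodup → (step S a).Nodup) :
    ∀ (l : List α) (S : PySem.Set Int), S.Nodup → (l.foldl step S).Nodup := by
  intro l
  induction l with
  | nil => intro S hS; simpa using hS
  | cons a l ih => intro S hS; exact ih _ (h _ _ hS)

-- A's set: membership characterization
lemma pv_memA (lst : List Int) (x : Int) :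
    x ∈ ((PySem.List.pyRange 0 (PySem.List.len lst) 1).foldl (fun A i =>
      (PySem.List.pyRange 0 (PySem.List.len lst) 1).foldl (fun A j =>
        if i ≠ j then
          if ¬ (|PySem.List.pyGetD lst i 0 - PySem.List.pyGetD lst j 0| > |i - j|) then
            PySem.Set.add (PySem.Set.add A (PySem.List.pyGetD lst i 0)) (PySem.List.pyGetD lst j 0)
          else A
        else A) A) (PySem.Set.empty : PySem.Set Int)) ↔
    ∃ k, k < lst.length ∧ pvPart lst k ∧ pvV lst k = x := by
  rw [pv_mem_foldl _
    (fun i x => ∃ j ∈ PySem.List.pyRange 0 (PySem.List.len lst) 1,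
      (i ≠ j ∧ ¬ (|PySem.List.pyGetD lst i 0 - PySem.List.pyGetD lst j 0| > |i - j|)) ∧
      (x = PySem.List.pyGetD lst i 0 ∨ x = PySem.List.pyGetD lst j 0))
    (fun S i x => by
      rw [pv_mem_foldl _
        (fun j x => (i ≠ j ∧ ¬ (|PySem.List.pyGetD lst i 0 - PySem.List.pyGetD lst j 0| > |i - j|)) ∧
          (x = PySem.List.pyGetD lst i 0 ∨ x = PySem.List.pyGetD lst j 0))
        (fun S j x => by
          by_cases h1 : i ≠ j
          · by_cases h2 : ¬ (|PySem.List.pyGetD lst i 0 - PySem.List.pyGetD lst j 0| > |i - j|)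
            · rw [if_pos h1, if_pos h2]
              simp only [PySem.Set.mem_add]
              constructor
              · rintro ((hx | rfl) | rfl)
                · exact Or.inl hx
                · exact Or.inr ⟨⟨h1, h2⟩, Or.inl rfl⟩
                · exact Or.inr ⟨⟨h1, h2⟩, Or.inr rfl⟩
              · rintro (hx | ⟨_, (rfl | rfl)⟩)
                · exact Or.inl (Or.inl hx)
                · exact Or.inl (Or.inr rfl)
                · exact Or.inr rfl
            · rw [if_pos h1, if_neg h2]
              constructor
              · exact Or.inl
              · rintro (hx | ⟨⟨_, hc⟩, _⟩); exacts [hx, absurd hc h2]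
          · rw [if_neg h1]
            constructor
            · exact Or.inl
            · rintro (hx | ⟨⟨hc, _⟩, _⟩); exacts [hx, absurd hc h1]) _ S x])]
  have hv : ∀ i : Int, 0 ≤ i → i < (lst.length : Int) →
      PySem.List.pyGetD lst i 0 = pvV lst i.toNat := by
    intro i h0 h1
    rw [PySem.List.pyGetD_eq_getElem lst 0 h0 (by simpa using h1)]
    rw [pvV_getElem lst i.toNat (by omega)]
  simp only [PySem.List.mem_pyRange_one, PySem.List.len_eq]
  constructor
  · rintro (h | ⟨i, ⟨hi0, hi1⟩, j, ⟨hj0, hj1⟩, ⟨hij, hcond⟩, hx⟩)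
    · exact absurd h (by simp [PySem.Set.empty])
    rw [not_lt] at hcond
    rw [hv i hi0 hi1, hv j hj0 hj1] at hcond hx
    have hcast : (i.toNat : Int) = i := Int.toNat_of_nonneg hi0
    have hcast' : (j.toNat : Int) = j := Int.toNat_of_nonneg hj0
    rcases hx with rfl | rfl
    · refine ⟨i.toNat, by omega, ⟨j.toNat, by omega, by omega, ?_⟩, rfl⟩
      rw [hcast, hcast']; exact hcond
    · refine ⟨j.toNat, by omega, ⟨i.toNat, by omega, by omega, ?_⟩, rfl⟩
      rw [hcast, hcast', abs_sub_comm (pvV lst j.toNat) _, abs_sub_comm (j:Int) _]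
      exact hcond
  · rintro ⟨k, hk, ⟨j, hj, hjk, hcond⟩, rfl⟩
    refine Or.inr ⟨(k : Int), ⟨by omega, by omega⟩, (j : Int), ⟨by omega, by omega⟩,
      ⟨by exact_mod_cast fun h => hjk (by omega), ?_⟩, Or.inl ?_⟩
    · rw [not_lt, hv (k:Int) (by omega) (by omega), hv (j:Int) (by omega) (by omega)]
      simpa using hcond
    · rw [hv (k:Int) (by omega) (by omega)]; simp

lemma pv_nodupA (lst : List Int) :
    ((PySem.List.pyRange 0 (PySem.List.len lst) 1).foldl (fun A i =>
      (PySem.List.pyRange 0 (PySem.List.len lst) 1).foldl (fun A j =>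
        if i ≠ j then
          if ¬ (|PySem.List.pyGetD lst i 0 - PySem.List.pyGetD lst j 0| > |i - j|) then
            PySem.Set.add (PySem.Set.add A (PySem.List.pyGetD lst i 0)) (PySem.List.pyGetD lst j 0)
          else A
        else A) A) (PySem.Set.empty : PySem.Set Int)).Nodup := by
  refine pv_nodup_foldl _ (fun S i hS => ?_) _ _ List.nodup_nil
  refine pv_nodup_foldl _ (fun S j hS => ?_) _ _ hS
  by_cases h1 : i ≠ j
  · by_cases h2 : ¬ (|PySem.List.pyGetD lst i 0 - PySem.List.pyGetD lst j 0| > |i - j|)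
    · rw [if_pos h1, if_pos h2]
      exact PySem.Set.nodup_add _ _ (PySem.Set.nodup_add _ _ hS)
    · rw [if_pos h1, if_neg h2]; exact hS
  · rw [if_neg h1]; exact hS

-- max?/min? of a list extended on the right
lemma pv_max?_append (l : List Int) (y : Int) :
    (l ++ [y]).max? = some ((l.max?).elim y (fun m => max m y)) := by
  cases l with
  | nil => rfl
  | cons a l => simp [List.max?, List.foldl_append]

lemma pv_min?_append (l : List Int) (y : Int) :
    (l ++ [y]).min? = some ((l.min?).elim y (fun m => min m y)) := by
  cases l with
  | nil => rfl
  | cons a l => simp [List.min?, List.foldl_append]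

lemma pv_le_max? (l : List Int) (w : Int) :
    (∃ s ∈ l, w ≤ s) ↔ (∃ m, l.max? = some m ∧ w ≤ m) := by
  cases hm : l.max? with
  | none => simp_all [List.max?_eq_none_iff]
  | some m =>
    rw [List.max?_eq_some_iff] at hm
    constructor
    · rintro ⟨s, hs, hws⟩; exact ⟨m, rfl, le_trans hws (hm.2 s hs)⟩
    · rintro ⟨m', hm', hw⟩; cases hm'; exact ⟨m, hm.1, hw⟩

lemma pv_min?_le (l : List Int) (w : Int) :
    (∃ s ∈ l, s ≤ w) ↔ (∃ m, l.min? = some m ∧ m ≤ w) := by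
  cases hm : l.min? with
  | none => simp_all [List.min?_eq_none_iff]
  | some m =>
    rw [List.min?_eq_some_iff] at hm
    constructor
    · rintro ⟨s, hs, hws⟩; exact ⟨m, rfl, le_trans (hm.2 s hs) hws⟩
    · rintro ⟨m', hm', hw⟩; cases hm'; exact ⟨m, hm.1, hw⟩

-- irreflexivity / asymmetry of the strict sort order
lemma pv_klt_irrefl (a : Int × Int × Int) : ¬ pvKlt a a := by unfold pvKlt; omega

lemma pv_klt_asymm {a b : Int × Int × Int} (h1 : pvKlt a b) (h2 : pvKlt b a) : False := by
  unfold pvKlt at h1 h2; omega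

-- the suffix sweep: processed in strictly key-descending order, an element is marked
-- iff some already-seen value or some strictly key-larger element of r reaches its nw
lemma pv_scan1_mem (r : List (Int × Int × Int)) :
    ∀ (S : PySem.Set Int) (seen : List Int),
    r.Pairwise (fun a b => pvKlt b a) → ∀ (x : Int),
    (x ∈ (r.foldl pvStep1 (S, seen.max?)).1 ↔
      x ∈ S ∨ ∃ t ∈ r, ((∃ s ∈ seen, t.2.1 ≤ s) ∨ ∃ t' ∈ r, pvKlt t t' ∧ t.2.1 ≤ t'.2.1) ∧ x = t.2.2) := by
  induction r with
  | nil => intro S seen _ x; simp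
  | cons a r ih =>
    intro S seen hp x
    rw [List.pairwise_cons] at hp
    obtain ⟨ha, hp'⟩ := hp
    rw [List.foldl_cons]
    -- the step's result
    have hstep : pvStep1 (S, seen.max?) a
        = ((if ∃ s ∈ seen, a.2.1 ≤ s then PySem.Set.add S a.2.2 else S),
           (seen ++ [a.2.1]).max?) := by
      rcases hm : seen.max? with _ | m
      · have hseen : seen = [] := List.max?_eq_none_iff.mp hm
        subst hseen
        simp [pvStep1, List.max?]
      · have hle : ∀ w : Int, (∃ s ∈ seen, w ≤ s) ↔ w ≤ m := by
          intro w
          rw [pv_le_max?]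
          constructor
          · rintro ⟨m', hm', h⟩; rw [hm] at hm'; cases hm'; exact h
          · intro h; exact ⟨m, hm, h⟩
        rw [pv_max?_append, hm]
        simp only [pvStep1, Option.elim]
        apply Prod.ext
        · show (if m ≥ a.2.1 then S.add a.2.2 else S) = _
          by_cases h : a.2.1 ≤ m
          · rw [if_pos h, if_pos ((hle a.2.1).mpr h)]
          · rw [if_neg h, if_neg (fun hc => h ((hle a.2.1).mp hc))]
        · show (if a.2.1 > m then some a.2.1 else some m) = some (max m a.2.1)
          split_ifs with h <;> congr 1 <;> omega
    rw [hstep, ih _ (seen ++ [a.2.1]) hp' x]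
    -- facts about a versus r
    have hka : ∀ t' ∈ a :: r, ¬ (pvKlt a t') := by
      intro t' ht'
      rcases List.mem_cons.mp ht' with rfl | ht'
      · exact pv_klt_irrefl _
      · exact fun h => pv_klt_asymm h (ha t' ht')
    constructor
    · rintro (hx | ⟨t, ht, hc, hxt⟩)
      · -- from the step on a
        by_cases hs : ∃ s ∈ seen, a.2.1 ≤ s
        · rw [if_pos hs, PySem.Set.mem_add] at hx
          rcases hx with hx | rfl
          · exact Or.inl hx
          · exact Or.inr ⟨a, List.mem_cons_self, Or.inl hs, rfl⟩
        · rw [if_neg hs] at hx; exact Or.inl hx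
      · -- an element of r
        refine Or.inr ⟨t, List.mem_cons_of_mem _ ht, ?_, hxt⟩
        rcases hc with ⟨s, hs, hts⟩ | ⟨t', ht', h1, h2⟩
        · rcases List.mem_append.mp hs with hs | hs
          · exact Or.inl ⟨s, hs, hts⟩
          · -- s = a.2.1 : the element a reaches t
            rcases List.mem_singleton.mp hs with rfl
            exact Or.inr ⟨a, List.mem_cons_self, ha t ht, hts⟩
        · exact Or.inr ⟨t', List.mem_cons_of_mem _ ht', h1, h2⟩
    · rintro (hx | ⟨t, ht, hc, hxt⟩)
      · left
        split_ifs with hs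
        · rw [PySem.Set.mem_add]; exact Or.inl hx
        · exact hx
      · rcases List.mem_cons.mp ht with rfl | ht
        · -- t = a : only the seen part can apply
          rcases hc with ⟨s, hs, hts⟩ | ⟨t', ht', h1, _⟩
          · left
            rw [if_pos ⟨s, hs, hts⟩, PySem.Set.mem_add]
            exact Or.inr hxt
          · exact absurd h1 (hka t' ht')
        · refine Or.inr ⟨t, ht, ?_, hxt⟩
          rcases hc with ⟨s, hs, hts⟩ | ⟨t', ht', h1, h2⟩
          · exact Or.inl ⟨s, List.mem_append.mpr (Or.inl hs), hts⟩
          · rcases List.mem_cons.mp ht' with rfl | ht'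
            · exact Or.inl ⟨t'.2.1, List.mem_append.mpr (Or.inr (List.mem_singleton_self _)), h2⟩
            · exact Or.inr ⟨t', ht', h1, h2⟩

-- the prefix sweep, mirror image: processed in strictly key-ascending order
lemma pv_scan2_mem (r : List (Int × Int × Int)) :
    ∀ (S : PySem.Set Int) (seen : List Int),
    r.Pairwise (fun a b => pvKlt a b) → ∀ (x : Int),
    (x ∈ (r.foldl pvStep2 (S, seen.min?)).1 ↔
      x ∈ S ∨ ∃ t ∈ r, ((∃ s ∈ seen, s ≤ t.2.1) ∨ ∃ t' ∈ r, pvKlt t' t ∧ t'.2.1 ≤ t.2.1) ∧ x = t.2.2) := by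
  induction r with
  | nil => intro S seen _ x; simp
  | cons a r ih =>
    intro S seen hp x
    rw [List.pairwise_cons] at hp
    obtain ⟨ha, hp'⟩ := hp
    rw [List.foldl_cons]
    have hstep : pvStep2 (S, seen.min?) a
        = ((if ∃ s ∈ seen, s ≤ a.2.1 then PySem.Set.add S a.2.2 else S),
           (seen ++ [a.2.1]).min?) := by
      rcases hm : seen.min? with _ | m
      · have hseen : seen = [] := List.min?_eq_none_iff.mp hm
        subst hseen
        simp [pvStep2, List.min?]
      · have hle : ∀ w : Int, (∃ s ∈ seen, s ≤ w) ↔ m ≤ w := by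
          intro w
          rw [pv_min?_le]
          constructor
          · rintro ⟨m', hm', h⟩; rw [hm] at hm'; cases hm'; exact h
          · intro h; exact ⟨m, hm, h⟩
        rw [pv_min?_append, hm]
        simp only [pvStep2, Option.elim]
        apply Prod.ext
        · show (if m ≤ a.2.1 then S.add a.2.2 else S) = _
          by_cases h : m ≤ a.2.1
          · rw [if_pos h, if_pos ((hle a.2.1).mpr h)]
          · rw [if_neg h, if_neg (fun hc => h ((hle a.2.1).mp hc))]
        · show (if a.2.1 < m then some a.2.1 else some m) = some (min m a.2.1)
          split_ifs with h <;> congr 1 <;> omega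
    rw [hstep, ih _ (seen ++ [a.2.1]) hp' x]
    have hka : ∀ t' ∈ a :: r, ¬ (pvKlt t' a) := by
      intro t' ht'
      rcases List.mem_cons.mp ht' with rfl | ht'
      · exact pv_klt_irrefl _
      · exact fun h => pv_klt_asymm h (ha t' ht')
    constructor
    · rintro (hx | ⟨t, ht, hc, hxt⟩)
      · by_cases hs : ∃ s ∈ seen, s ≤ a.2.1
        · rw [if_pos hs, PySem.Set.mem_add] at hx
          rcases hx with hx | rfl
          · exact Or.inl hx
          · exact Or.inr ⟨a, List.mem_cons_self, Or.inl hs, rfl⟩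
        · rw [if_neg hs] at hx; exact Or.inl hx
      · refine Or.inr ⟨t, List.mem_cons_of_mem _ ht, ?_, hxt⟩
        rcases hc with ⟨s, hs, hts⟩ | ⟨t', ht', h1, h2⟩
        · rcases List.mem_append.mp hs with hs | hs
          · exact Or.inl ⟨s, hs, hts⟩
          · rcases List.mem_singleton.mp hs with rfl
            exact Or.inr ⟨a, List.mem_cons_self, ha t ht, hts⟩
        · exact Or.inr ⟨t', List.mem_cons_of_mem _ ht', h1, h2⟩
    · rintro (hx | ⟨t, ht, hc, hxt⟩)
      · left
        split_ifs with hs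
        · rw [PySem.Set.mem_add]; exact Or.inl hx
        · exact hx
      · rcases List.mem_cons.mp ht with rfl | ht
        · rcases hc with ⟨s, hs, hts⟩ | ⟨t', ht', h1, _⟩
          · left
            rw [if_pos ⟨s, hs, hts⟩, PySem.Set.mem_add]
            exact Or.inr hxt
          · exact absurd h1 (hka t' ht')
        · refine Or.inr ⟨t, ht, ?_, hxt⟩
          rcases hc with ⟨s, hs, hts⟩ | ⟨t', ht', h1, h2⟩
          · exact Or.inl ⟨s, List.mem_append.mpr (Or.inl hs), hts⟩
          · rcases List.mem_cons.mp ht' with rfl | ht'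
            · exact Or.inl ⟨t'.2.1, List.mem_append.mpr (Or.inr (List.mem_singleton_self _)), h2⟩
            · exact Or.inr ⟨t', ht', h1, h2⟩

-- B's sorted point list
def pvPts (lst : List Int) : List (Int × Int × Int) :=
  PySem.List.sorted2 ((PySem.List.enumerate lst).map (fun p => (p.2 + p.1, p.1 - p.2, p.2)))
    (fun t => t.1) (fun t => t.2.1)

-- B's final marked set
def pvMarked (lst : List Int) : PySem.Set Int :=
  ((pvPts lst).foldl pvStep2
    (((pvPts lst).reverse.foldl pvStep1 (PySem.Set.empty, none)).1, none)).1

lemma pv_alt_eq (lst : List Int) : num_elem_rule_alt lst = PySem.Set.len (pvMarked lst) := rfl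

-- sorted2 with these keys is sorted by the lexicographic key
lemma pv_sorted2_eq (xs : List (Int × Int × Int)) :
    PySem.List.sorted2 xs (fun t => t.1) (fun t => t.2.1)
      = PySem.List.sorted xs (fun t => (toLex (t.1, t.2.1) : Int ×ₗ Int)) := by
  unfold PySem.List.sorted2 PySem.List.sorted
  simp only [Bool.false_eq_true, if_false]
  congr 1
  funext acc t
  congr 1
  funext a b
  rw [Bool.eq_iff_iff]
  simp only [Bool.or_eq_true, Bool.and_eq_true, Bool.not_eq_true', decide_eq_true_eq,
    decide_eq_false_iff_not, Prod.Lex.toLex_lt_toLex]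
  omega

lemma pv_mem_pts (lst : List Int) (t : Int × Int × Int) :
    t ∈ pvPts lst ↔ ∃ k, k < lst.length ∧ t = pvTrip lst k := by
  unfold pvPts
  rw [(PySem.List.sorted2_perm _ _ _ _).mem_iff]
  simp only [List.mem_map, PySem.List.mem_enumerate_iff]
  constructor
  · rintro ⟨p, ⟨k, hk, rfl⟩, rfl⟩
    exact ⟨k, hk, by simp [pvTrip, pvV_getElem _ _ hk]⟩
  · rintro ⟨k, hk, rfl⟩
    exact ⟨((k : Int), lst[k]), ⟨k, hk, by simp⟩,
      by simp [pvTrip, pvV_getElem _ _ hk]⟩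

lemma pv_key_inj (lst : List Int) {t t' : Int × Int × Int}
    (ht : t ∈ pvPts lst) (ht' : t' ∈ pvPts lst)
    (h1 : t.1 = t'.1) (h2 : t.2.1 = t'.2.1) : t = t' := by
  obtain ⟨k, hk, rfl⟩ := (pv_mem_pts _ _).mp ht
  obtain ⟨k', hk', rfl⟩ := (pv_mem_pts _ _).mp ht'
  simp only [pvTrip] at h1 h2 ⊢
  have : (k : Int) = (k' : Int) := by omega
  have : k = k' := by omega
  subst this
  rfl

lemma pv_pts_pairwise (lst : List Int) : (pvPts lst).Pairwise pvKlt := by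
  have hnd : (pvPts lst).Nodup := by
    refine ((PySem.List.sorted2_perm _ _ _ _).nodup_iff).mpr ?_
    refine List.Nodup.map ?_ ?_
    · intro p q h
      have h3 : p.2 = q.2 := congrArg (fun t => t.2.2) h
      have h1 : p.2 + p.1 = q.2 + q.1 := congrArg (fun t => t.1) h
      exact Prod.ext (by omega) h3
    · exact ((PySem.List.pairwise_lt_enumerate lst 0).imp (fun h => by
        intro he; rw [he] at h; exact lt_irrefl _ h))
  have hle : (pvPts lst).Pairwise
      (fun a b => (toLex (a.1, a.2.1) : Int ×ₗ Int) ≤ toLex (b.1, b.2.1)) := by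
    unfold pvPts
    rw [pv_sorted2_eq]
    exact PySem.List.sorted_pairwise _ _
  refine (hle.and hnd).imp_of_mem (fun {a b} ha hb ⟨h1, h2⟩ => ?_)
  rw [Prod.Lex.toLex_le_toLex] at h1
  rcases h1 with h1 | ⟨h1, h1'⟩
  · exact Or.inl h1
  · rcases lt_or_eq_of_le h1' with h | h
    · exact Or.inr ⟨h1, h⟩
    · exact absurd (pv_key_inj lst ha hb h1 h) h2

lemma pv_klt_le1 {a b : Int × Int × Int} (h : pvKlt a b) : a.1 ≤ b.1 := by
  unfold pvKlt at h; omega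

-- the pair condition of A in point coordinates: comparability of the two points
lemma pv_edge_iff (lst : List Int) (k j : Nat) :
    (((pvTrip lst k).1 ≤ (pvTrip lst j).1 ∧ (pvTrip lst k).2.1 ≤ (pvTrip lst j).2.1) ∨
     ((pvTrip lst j).1 ≤ (pvTrip lst k).1 ∧ (pvTrip lst j).2.1 ≤ (pvTrip lst k).2.1))
    ↔ |pvV lst k - pvV lst j| ≤ |(k : Int) - (j : Int)| := by
  simp only [pvTrip]
  rcases abs_cases (pvV lst k - pvV lst j) with ⟨h1, _⟩ | ⟨h1, _⟩ <;>
    rcases abs_cases ((k : Int) - (j : Int)) with ⟨h2, _⟩ | ⟨h2, _⟩ <;>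
      rw [h1, h2] <;> omega

-- being marked by one of the two sweeps is exactly participation
lemma pv_cond_iff (lst : List Int) (k : Nat) (hk : k < lst.length) :
    ((∃ t' ∈ pvPts lst, pvKlt (pvTrip lst k) t' ∧ (pvTrip lst k).2.1 ≤ t'.2.1) ∨
     (∃ t' ∈ pvPts lst, pvKlt t' (pvTrip lst k) ∧ t'.2.1 ≤ (pvTrip lst k).2.1))
    ↔ pvPart lst k := by
  have htk : pvTrip lst k ∈ pvPts lst := (pv_mem_pts _ _).mpr ⟨k, hk, rfl⟩
  constructor
  · rintro (⟨t', ht', hlt, hle⟩ | ⟨t', ht', hlt, hle⟩)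
    · obtain ⟨j, hj, rfl⟩ := (pv_mem_pts _ _).mp ht'
      refine ⟨j, hj, fun he => by subst he; exact pv_klt_irrefl _ hlt, ?_⟩
      rw [← pv_edge_iff]
      exact Or.inl ⟨pv_klt_le1 hlt, hle⟩
    · obtain ⟨j, hj, rfl⟩ := (pv_mem_pts _ _).mp ht'
      refine ⟨j, hj, fun he => by subst he; exact pv_klt_irrefl _ hlt, ?_⟩
      rw [← pv_edge_iff]
      exact Or.inr ⟨pv_klt_le1 hlt, hle⟩
  · rintro ⟨j, hj, hjk, hcond⟩
    rw [← pv_edge_iff] at hcond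
    have htj : pvTrip lst j ∈ pvPts lst := (pv_mem_pts _ _).mpr ⟨j, hj, rfl⟩
    have hne : ¬ (pvTrip lst k = pvTrip lst j) := by
      intro h
      apply hjk
      have h1 := congrArg (fun t : Int × Int × Int => t.1) h
      have h2 := congrArg (fun t : Int × Int × Int => t.2.1) h
      simp only [pvTrip] at h1 h2
      omega
    rcases hcond with ⟨h1, h2⟩ | ⟨h1, h2⟩
    · refine Or.inl ⟨pvTrip lst j, htj, ?_, h2⟩
      rcases lt_or_eq_of_le h1 with h | h
      · exact Or.inl h
      · rcases lt_or_eq_of_le h2 with h' | h'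
        · exact Or.inr ⟨h, h'⟩
        · exact absurd (pv_key_inj lst htk htj h h') hne
    · refine Or.inr ⟨pvTrip lst j, htj, ?_, h2⟩
      rcases lt_or_eq_of_le h1 with h | h
      · exact Or.inl h
      · rcases lt_or_eq_of_le h2 with h' | h'
        · exact Or.inr ⟨h, h'⟩
        · exact absurd (pv_key_inj lst htj htk h h') (fun he => hne he.symm)

-- B's marked set: membership characterization
lemma pv_memB (lst : List Int) (x : Int) :
    x ∈ pvMarked lst ↔ ∃ k, k < lst.length ∧ pvPart lst k ∧ pvV lst k = x := by
  have hpw := pv_pts_pairwise lst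
  have hpw' : (pvPts lst).reverse.Pairwise (fun a b => pvKlt b a) :=
    List.pairwise_reverse.mpr hpw
  have h1 := pv_scan1_mem (pvPts lst).reverse PySem.Set.empty [] hpw' x
  have h2 := pv_scan2_mem (pvPts lst)
    (((pvPts lst).reverse.foldl pvStep1 (PySem.Set.empty, none)).1) [] hpw x
  simp only [List.max?_nil] at h1
  simp only [List.min?_nil] at h2
  unfold pvMarked
  rw [h2, h1]
  simp only [List.mem_reverse, List.not_mem_nil, false_and, exists_false, false_or]
  have hemp : ∀ y : Int, y ∈ (PySem.Set.empty : PySem.Set Int) ↔ False := by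
    intro y; simp [PySem.Set.empty]
  rw [hemp]
  simp only [false_or]
  constructor
  · rintro (⟨t, ht, hc, rfl⟩ | ⟨t, ht, hc, rfl⟩)
    · obtain ⟨k, hk, rfl⟩ := (pv_mem_pts _ _).mp ht
      exact ⟨k, hk, (pv_cond_iff lst k hk).mp (Or.inl hc), rfl⟩
    · obtain ⟨k, hk, rfl⟩ := (pv_mem_pts _ _).mp ht
      exact ⟨k, hk, (pv_cond_iff lst k hk).mp (Or.inr hc), rfl⟩
  · rintro ⟨k, hk, hpart, rfl⟩
    have htk : pvTrip lst k ∈ pvPts lst := (pv_mem_pts _ _).mpr ⟨k, hk, rfl⟩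
    rcases (pv_cond_iff lst k hk).mpr hpart with hc | hc
    · exact Or.inl ⟨pvTrip lst k, htk, hc, rfl⟩
    · exact Or.inr ⟨pvTrip lst k, htk, hc, rfl⟩

lemma pv_nodup_scan1 (r : List (Int × Int × Int)) :
    ∀ (S : PySem.Set Int) (o : Option Int), S.Nodup → ((r.foldl pvStep1 (S, o)).1).Nodup := by
  induction r with
  | nil => intro S o h; exact h
  | cons a r ih =>
    intro S o h
    rw [List.foldl_cons, show pvStep1 (S, o) a = ((pvStep1 (S, o) a).1, (pvStep1 (S, o) a).2) from rfl]
    refine ih _ _ ?_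
    rcases o with _ | m
    · simpa [pvStep1] using h
    · simp only [pvStep1]
      split_ifs
      · exact PySem.Set.nodup_add _ _ h
      · exact h

lemma pv_nodup_scan2 (r : List (Int × Int × Int)) :
    ∀ (S : PySem.Set Int) (o : Option Int), S.Nodup → ((r.foldl pvStep2 (S, o)).1).Nodup := by
  induction r with
  | nil => intro S o h; exact h
  | cons a r ih =>
    intro S o h
    rw [List.foldl_cons, show pvStep2 (S, o) a = ((pvStep2 (S, o) a).1, (pvStep2 (S, o) a).2) from rfl]
    refine ih _ _ ?_
    rcases o with _ | m
    · simpa [pvStep2] using h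
    · simp only [pvStep2]
      split_ifs
      · exact PySem.Set.nodup_add _ _ h
      · exact h

lemma pv_nodupB (lst : List Int) : (pvMarked lst).Nodup := by
  unfold pvMarked
  exact pv_nodup_scan2 _ _ _ (pv_nodup_scan1 _ _ _ List.nodup_nil)

-- ===== VERDICT (by name: the statement is the Claim_ definition above) =====
theorem num_elem_rule_spec : Claim_equal_num_elem_rule := by
  intro lst _
  unfold Spec_num_elem_rule
  rw [pv_alt_eq]
  unfold num_elem_rule
  have hperm := (List.perm_ext_iff_of_nodup (pv_nodupA lst) (pv_nodupB lst)).mpr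
    (fun a => by rw [pv_memA, pv_memB])
  simp only [PySem.Set.len]
  exact_mod_cast hperm.length_eq
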